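-- pv_equiv track=rewrite | github.com/azoner/pyx12 | pyx12/syntax.py | syntax_ele_id_str
-- ===== SOURCE A (Python) =====
-- def syntax_ele_id_str(seg_id: str | None, ele_pos_list: list[int]) -> str:
--     """
--     :rtype: string
--     """
--     output = ""
--     output += f"{seg_id}{ele_pos_list[0]:02d}"
--     for i in range(len(ele_pos_list) - 1):
--         if i == len(ele_pos_list) - 2:
--             output += f" or {seg_id}{ele_pos_list[i + 1]:02d}"
--         else:
--             output += f", {seg_id}{ele_pos_list[i + 1]:02d}"
--     return output
-- ===== SOURCE B (Python) =====
-- def syntax_ele_id_str(seg_id, ele_pos_list):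
--     parts = [f"{seg_id}{p:02d}" for p in ele_pos_list]
--     if len(parts) == 1:
--         return parts[0]
--     return ", ".join(parts[:-1]) + " or " + parts[-1]
-- ===== Notes on version B (the rewrite author's own statement) =====
-- stated objective: simpler
-- what changed: Replaces A's index loop with a last-element-selecting branch inside it by a comprehension building all formatted pieces, then a slice/join for the comma part and a single concatenation for the final ' or ' piece.
import Mathlib
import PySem

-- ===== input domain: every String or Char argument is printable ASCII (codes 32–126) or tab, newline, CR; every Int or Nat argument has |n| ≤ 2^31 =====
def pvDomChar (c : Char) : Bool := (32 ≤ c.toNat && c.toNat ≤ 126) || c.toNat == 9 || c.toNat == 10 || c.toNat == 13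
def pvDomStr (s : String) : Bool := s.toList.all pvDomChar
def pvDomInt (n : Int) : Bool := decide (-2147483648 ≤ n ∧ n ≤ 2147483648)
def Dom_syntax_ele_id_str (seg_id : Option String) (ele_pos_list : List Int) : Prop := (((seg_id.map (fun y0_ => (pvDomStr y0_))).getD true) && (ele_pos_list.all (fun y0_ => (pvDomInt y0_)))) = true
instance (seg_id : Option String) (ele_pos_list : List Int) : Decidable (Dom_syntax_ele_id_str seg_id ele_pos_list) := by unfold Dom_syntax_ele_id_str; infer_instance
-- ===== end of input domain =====

-- B replaces A's index loop (which picks ", " or " or " with a branch inside the loop)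
-- by a comprehension of formatted pieces plus a slice/join and one final concatenation (objective: simpler).

-- f"{seg_id}" : str(None) = "None", str(s) = s  (shared by both f-strings)
def pvStrOfOpt (seg_id : Option String) : String :=
  match seg_id with
  | none => "None"
  | some s => s

-- f"{p:02d}" : zero-pad to width 2 (only single-digit non-negatives are shorter than 2)
def pvFmt02 (p : Int) : String :=
  if 0 ≤ p ∧ p < 10 then "0" ++ PySem.Int.toStr p else PySem.Int.toStr p

-- f"{seg_id}{p:02d}"  (the identical f-string appears in A and in B)
def pvPiece (seg_id : Option String) (p : Int) : String :=
  pvStrOfOpt seg_id ++ pvFmt02 p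

-- ===== PORT A =====
def syntax_ele_id_str (seg_id : Option String) (ele_pos_list : List Int) : String :=
  let output : String := "" ++ pvPiece seg_id (PySem.List.pyGetD ele_pos_list 0 0)
  (PySem.List.pyRange 0 ((ele_pos_list.length : Int) - 1) 1).foldl
    (fun output i =>
      if i = (ele_pos_list.length : Int) - 2 then
        output ++ (" or " ++ pvPiece seg_id (PySem.List.pyGetD ele_pos_list (i + 1) 0))
      else
        output ++ (", " ++ pvPiece seg_id (PySem.List.pyGetD ele_pos_list (i + 1) 0)))
    output

-- ===== PORT B =====
def syntax_ele_id_str_alt (seg_id : Option String) (ele_pos_list : List Int) : String :=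
  let parts := ele_pos_list.map (fun p => pvPiece seg_id p)
  if parts.length = 1 then
    PySem.List.pyGetD parts 0 ""
  else
    PySem.Str.join ", " (PySem.List.slice parts none (some (-1))) ++ " or " ++
      PySem.List.pyGetD parts (-1) ""

-- ===== PRECONDITION & SPEC =====
-- Pre_ excludes only the empty list, on which the Python A raises IndexError (ele_pos_list[0]).
def Pre_syntax_ele_id_str (seg_id : Option String) (ele_pos_list : List Int) : Prop :=
  ele_pos_list ≠ []
instance (seg_id : Option String) (ele_pos_list : List Int) : Decidable (Pre_syntax_ele_id_str seg_id ele_pos_list) := by unfold Pre_syntax_ele_id_str; infer_instance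

def pvWitness_syntax_ele_id_str : Option String × List Int := (some "SEG", [1, 2])

def Spec_syntax_ele_id_str (seg_id : Option String) (ele_pos_list : List Int) (out : String) : Prop := out = syntax_ele_id_str_alt seg_id ele_pos_list
instance (seg_id : Option String) (ele_pos_list : List Int) (out : String) : Decidable (Spec_syntax_ele_id_str seg_id ele_pos_list out) := by unfold Spec_syntax_ele_id_str; infer_instance

-- ===== CLAIM (what is proved, stated in full; the proofs are below) =====
def Claim_equal_syntax_ele_id_str : Prop := ∀ (seg_id : Option String) (ele_pos_list : List Int), Dom_syntax_ele_id_str seg_id ele_pos_list → Pre_syntax_ele_id_str seg_id ele_pos_list → Spec_syntax_ele_id_str seg_id ele_pos_list (syntax_ele_id_str seg_id ele_pos_list)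

-- ===== LEMMAS AND PROOFS =====

-- String-level reading of PySem.Chars.join_singleton
theorem pv_join_singleton (h : String) : PySem.Str.join ", " [h] = h := by
  apply String.toList_inj.mp
  simp [PySem.Str.toList_join, PySem.Chars.join_singleton]

-- String-level reading of PySem.Chars.join_cons_cons
theorem pv_join_cons_cons (p q : String) (rest : List String) :
    PySem.Str.join ", " (p :: q :: rest) = p ++ ", " ++ PySem.Str.join ", " (q :: rest) := by
  apply String.toList_inj.mp
  simp [PySem.Str.toList_join, PySem.Chars.join_cons_cons]

theorem pv_foldl_pull (rest : List String) :
    ∀ (a b : String),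
      a ++ rest.foldl (fun x y => x ++ ", " ++ y) b
        = rest.foldl (fun x y => x ++ ", " ++ y) (a ++ b) := by
  induction rest with
  | nil => intro a b; rfl
  | cons s t ih =>
    intro a b
    simp only [List.foldl_cons]
    rw [ih (a := a) (b := b ++ ", " ++ s)]
    simp [String.append_assoc]

-- ", ".join(h :: t) as A's left-to-right accumulator
theorem pv_join_foldl (t : List String) :
    ∀ (h : String), PySem.Str.join ", " (h :: t) = t.foldl (fun a s => a ++ ", " ++ s) h := by
  induction t with
  | nil => intro h; exact pv_join_singleton h
  | cons s rest ih =>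
    intro h
    rw [pv_join_cons_cons, ih s, pv_foldl_pull]
    simp only [List.foldl_cons]

-- shift the loop index: fold of f (i+1) over range(0, b) = fold of f over range(1, b+1)
theorem pv_foldl_shift {β : Type} (f : β → Int → β) (init : β) (b : Int) :
    (PySem.List.pyRange 0 b 1).foldl (fun acc i => f acc (i + 1)) init
      = (PySem.List.pyRange 1 (b + 1) 1).foldl f init := by
  rw [PySem.List.pyRange_one 0 b, PySem.List.pyRange_one 1 (b + 1)]
  have hb : (b - 0).toNat = (b + 1 - 1).toNat := by omega
  rw [hb, List.foldl_map, List.foldl_map]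
  congr 1
  funext acc k
  congr 1
  omega

theorem syntax_ele_id_str_main (seg_id : Option String) (l : List Int) (hne : l ≠ []) :
    syntax_ele_id_str seg_id l = syntax_ele_id_str_alt seg_id l := by
  match l, hne with
  | [x], _ =>
    simp [syntax_ele_id_str, syntax_ele_id_str_alt, PySem.List.pyRange_one_eq_nil,
      PySem.List.pyGetD_zero_cons, String.empty_append]
  | x :: y :: ys, _ =>
    set l : List Int := x :: y :: ys with hl
    have hlen : 2 ≤ l.length := by simp [hl]
    have hnil : l ≠ [] := by simp [hl]
    set q : List Int := l.dropLast with hq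
    have hqlen : (q.length : Int) = (l.length : Int) - 1 := by
      simp [hq, List.length_dropLast]; omega
    -- ===== A side =====
    have hA : syntax_ele_id_str seg_id l
        = (q.drop 1).foldl (fun a s => a ++ ", " ++ pvPiece seg_id s) (pvPiece seg_id x)
            ++ " or " ++ pvPiece seg_id (l.getLast hnil) := by
      show (PySem.List.pyRange 0 ((l.length : Int) - 1) 1).foldl _ _ = _
      rw [show ((l.length : Int) - 1) = ((l.length : Int) - 2) + 1 by omega,
          PySem.List.pyRange_one_succ_right (by omega), List.foldl_append]
      simp only [List.foldl_cons, List.foldl_nil]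
      rw [if_pos trivial]
      -- drop the branch inside the loop: every index there is < len-2
      rw [PySem.List.foldl_congr_mem _ _
          (fun acc i => acc ++ (", " ++ pvPiece seg_id (PySem.List.pyGetD l (i + 1) 0))) _
          (by
            intro acc i hi
            rcases PySem.List.mem_pyRange_one.mp hi with ⟨h1, h2⟩
            rw [if_neg (by omega)])]
      -- shift the index so the loop reads l[j] directly
      rw [pv_foldl_shift (fun acc j => acc ++ (", " ++ pvPiece seg_id (PySem.List.pyGetD l j 0))) _ ((l.length : Int) - 2)]
      rw [show ((l.length : Int) - 2) + 1 = ((l.length : Int) - 1) by omega]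
      have hlast : PySem.List.pyGetD l ((l.length : Int) - 1) 0 = l.getLast hnil := by
        rw [PySem.List.pyGetD_eq_getElem l 0 (by omega) (by omega), List.getLast_eq_getElem]
        congr 1
        omega
      rw [hlast]
      -- the loop reads only the dropped-last prefix q
      rw [PySem.List.foldl_congr_mem _ _
          (fun acc j => acc ++ (", " ++ pvPiece seg_id (PySem.List.pyGetD q j 0))) _
          (by
            intro acc j hj
            rcases PySem.List.mem_pyRange_one.mp hj with ⟨h1, h2⟩
            have hg : PySem.List.pyGetD l j 0 = PySem.List.pyGetD q j 0 := by
              rw [PySem.List.pyGetD_eq_getElem l 0 (by omega) (by omega),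
                  PySem.List.pyGetD_eq_getElem q 0 (by omega) (by omega)]
              exact (List.getElem_dropLast _).symm
            rw [hg])]
      rw [← hqlen,
          PySem.List.foldl_pyRange_pyGetD' q 0
            (fun a s => a ++ (", " ++ pvPiece seg_id s)) _ (by norm_num)]
      rw [PySem.List.pyGetD_zero_cons, String.empty_append]
      simp [String.append_assoc]
    -- ===== B side =====
    have hmapne : l.map (fun p => pvPiece seg_id p) ≠ [] := by simp [hl]
    have hB : syntax_ele_id_str_alt seg_id l
        = PySem.Str.join ", " (q.map (fun p => pvPiece seg_id p))
            ++ " or " ++ pvPiece seg_id (l.getLast hnil) := by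
      show (if (l.map (fun p => pvPiece seg_id p)).length = 1 then
          PySem.List.pyGetD (l.map (fun p => pvPiece seg_id p)) 0 ""
        else
          PySem.Str.join ", " (PySem.List.slice (l.map (fun p => pvPiece seg_id p)) none (some (-1))) ++ " or " ++
            PySem.List.pyGetD (l.map (fun p => pvPiece seg_id p)) (-1) "")
        = PySem.Str.join ", " (q.map (fun p => pvPiece seg_id p))
            ++ " or " ++ pvPiece seg_id (l.getLast hnil)
      rw [if_neg (by simp [hl])]
      rw [PySem.List.slice_to_neg_one, PySem.List.pyGetD_neg_one _ _ hmapne]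
      rw [← List.map_dropLast, ← hq]
      congr 1
      rw [List.getLast_eq_getElem, List.getLast_eq_getElem, List.getElem_map]
      congr 1
      simp
    rw [hA, hB]
    -- the two assemblies agree: join over q = A's comma accumulator
    have hqx : q = x :: (y :: ys).dropLast := by simp [hq, hl]
    congr 1
    congr 1
    rw [hqx]
    simp only [List.map_cons, List.drop_succ_cons, List.drop_zero]
    rw [pv_join_foldl, List.foldl_map]

-- ===== VERDICT (by name: the statement is the Claim_ definition above) =====
theorem syntax_ele_id_str_spec : Claim_equal_syntax_ele_id_str := by
  intro seg_id ele_pos_list _ hpre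
  unfold Spec_syntax_ele_id_str
  exact syntax_ele_id_str_main seg_id ele_pos_list hpre
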